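-- pv_equiv track=rewrite | github.com/pypi-data/pypi-mirror-99 | packages/cygnsslib/cygnsslib-1.1.20-py3-none-any.whl/cygnsslib/cyg.py | check_cyg_quality
-- ===== SOURCE A (Python) =====
-- def check_cyg_quality(qflags_list, sp_rx_gain=1):
--     """
--
--     :param qflags_list:
--     :type qflags_list: list of str
--     :param sp_rx_gain: SP Rx gain
--     :type sp_rx_gain: float
--     :return:
--     """
--     lvl_1_flags = ['rfi_detected', 'direct_signal_in_ddm']
--     lvl_2_flags = ['s_band_powered_up', 'small_sc_attitude_err', 'large_sc_attitude_err', 'black_body_ddm', 'ddmi_reconfigured',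
--                    'spacewire_crc_invalid', 'ddm_is_test_pattern', 'channel_idle', 'large_step_lna_temp', 'sp_non_existent_error']
--     out_flag = 0 if sp_rx_gain > 0 else 2
--     for flag_msg in qflags_list:
--         if out_flag == 2:  # if we found lvl 2 flag, exit the loop
--             break
--         for flag in lvl_2_flags:
--             if flag in flag_msg:
--                 out_flag = 2
--                 break
--         if out_flag != 2:
--             for flag in lvl_1_flags:
--                 if flag in flag_msg:
--                     out_flag = 1
--                     break
--     return out_flag
-- ===== SOURCE B (Python) =====
-- def check_cyg_quality(qflags_list, sp_rx_gain=1):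
--     lvl_1_flags = ['rfi_detected', 'direct_signal_in_ddm']
--     lvl_2_flags = ['s_band_powered_up', 'small_sc_attitude_err', 'large_sc_attitude_err', 'black_body_ddm', 'ddmi_reconfigured',
--                    'spacewire_crc_invalid', 'ddm_is_test_pattern', 'channel_idle', 'large_step_lna_temp', 'sp_non_existent_error']
--     if not (sp_rx_gain > 0):
--         return 2
--     if any(f in msg for msg in qflags_list for f in lvl_2_flags):
--         return 2
--     if any(f in msg for msg in qflags_list for f in lvl_1_flags):
--         return 1
--     return 0
-- ===== Notes on version B (the rewrite author's own statement) =====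
-- stated objective: simpler
-- what changed: Replaces A's single stateful early-exit loop (interleaved level-2/level-1 checks with a mutable out_flag) by an early gain guard and two independent any()-scans, encoding the level-2-over-level-1 priority as return order instead of loop state.
import Mathlib
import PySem

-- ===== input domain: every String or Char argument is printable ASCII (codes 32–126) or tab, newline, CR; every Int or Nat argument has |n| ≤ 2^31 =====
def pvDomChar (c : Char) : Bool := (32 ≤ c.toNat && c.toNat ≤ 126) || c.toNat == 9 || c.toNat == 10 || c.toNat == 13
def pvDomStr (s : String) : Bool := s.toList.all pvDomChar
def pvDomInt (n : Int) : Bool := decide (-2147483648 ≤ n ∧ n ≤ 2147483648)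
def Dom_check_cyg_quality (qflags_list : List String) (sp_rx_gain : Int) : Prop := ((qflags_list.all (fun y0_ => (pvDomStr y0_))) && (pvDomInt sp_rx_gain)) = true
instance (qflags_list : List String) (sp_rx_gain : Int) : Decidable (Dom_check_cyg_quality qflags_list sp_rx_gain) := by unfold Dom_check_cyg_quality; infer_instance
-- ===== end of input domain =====

-- B replaces A's single stateful early-exit loop by a gain guard plus two independent any-scans
-- (level 2 first, then level 1); objective: simpler. Return-value equivalence, no side effects involved.

def pvLvl1Flags : List String := ["rfi_detected", "direct_signal_in_ddm"]
def pvLvl2Flags : List String := ["s_band_powered_up", "small_sc_attitude_err", "large_sc_attitude_err", "black_body_ddm", "ddmi_reconfigured",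
  "spacewire_crc_invalid", "ddm_is_test_pattern", "channel_idle", "large_step_lna_temp", "sp_non_existent_error"]

-- ===== PORT A =====
-- inner 'for flag in lvl_2_flags: if flag in flag_msg: out_flag = 2; break'
def pvScan2A : List String → String → Int → Int
  | [], _, out => out
  | f :: rest, msg, out => if PySem.Str.isIn f msg then 2 else pvScan2A rest msg out

-- inner 'for flag in lvl_1_flags: if flag in flag_msg: out_flag = 1; break'
def pvScan1A : List String → String → Int → Int
  | [], _, out => out
  | f :: rest, msg, out => if PySem.Str.isIn f msg then 1 else pvScan1A rest msg out

-- outer 'for flag_msg in qflags_list' with mutable out_flag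
def pvLoopA : List String → Int → Int
  | [], out => out
  | msg :: rest, out =>
    if out == 2 then out
    else
      let out2 := pvScan2A pvLvl2Flags msg out
      let out3 := if out2 != 2 then pvScan1A pvLvl1Flags msg out2 else out2
      pvLoopA rest out3

def check_cyg_quality (qflags_list : List String) (sp_rx_gain : Int) : Int :=
  pvLoopA qflags_list (if sp_rx_gain > 0 then 0 else 2)

-- ===== PORT B =====
def check_cyg_quality_alt (qflags_list : List String) (sp_rx_gain : Int) : Int :=
  if ¬ (sp_rx_gain > 0) then 2
  else if qflags_list.any (fun msg => pvLvl2Flags.any (fun f => PySem.Str.isIn f msg)) then 2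
  else if qflags_list.any (fun msg => pvLvl1Flags.any (fun f => PySem.Str.isIn f msg)) then 1
  else 0

-- ===== PRECONDITION & SPEC =====
def Spec_check_cyg_quality (qflags_list : List String) (sp_rx_gain : Int) (out : Int) : Prop := out = check_cyg_quality_alt qflags_list sp_rx_gain
instance (qflags_list : List String) (sp_rx_gain : Int) (out : Int) : Decidable (Spec_check_cyg_quality qflags_list sp_rx_gain out) := by unfold Spec_check_cyg_quality; infer_instance

-- ===== CLAIM (what is proved, stated in full; the proofs are below) =====
def Claim_equal_check_cyg_quality : Prop := ∀ (qflags_list : List String) (sp_rx_gain : Int), Dom_check_cyg_quality qflags_list sp_rx_gain → Spec_check_cyg_quality qflags_list sp_rx_gain (check_cyg_quality qflags_list sp_rx_gain)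

-- ===== LEMMAS AND PROOFS =====
theorem pvScan2A_eq (fs : List String) (msg : String) (out : Int) :
    pvScan2A fs msg out = if fs.any (fun f => PySem.Str.isIn f msg) then 2 else out := by
  induction fs with
  | nil => simp [pvScan2A]
  | cons f rest ih =>
    simp only [pvScan2A, List.any_cons]
    by_cases hf : PySem.Str.isIn f msg = true
    · simp only [hf, eq_self_iff_true, if_true, Bool.true_or]
    · have hf' : PySem.Str.isIn f msg = false := by revert hf; cases PySem.Str.isIn f msg <;> simp
      simp only [hf', Bool.false_eq_true, if_false, Bool.false_or, ih]

theorem pvScan1A_eq (fs : List String) (msg : String) (out : Int) :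
    pvScan1A fs msg out = if fs.any (fun f => PySem.Str.isIn f msg) then 1 else out := by
  induction fs with
  | nil => simp [pvScan1A]
  | cons f rest ih =>
    simp only [pvScan1A, List.any_cons]
    by_cases hf : PySem.Str.isIn f msg = true
    · simp only [hf, eq_self_iff_true, if_true, Bool.true_or]
    · have hf' : PySem.Str.isIn f msg = false := by revert hf; cases PySem.Str.isIn f msg <;> simp
      simp only [hf', Bool.false_eq_true, if_false, Bool.false_or, ih]

theorem pvLoopA_two (ms : List String) : pvLoopA ms 2 = 2 := by
  cases ms <;> simp [pvLoopA]

theorem pvLoopA_eq (ms : List String) (out : Int) (h : out = 0 ∨ out = 1) :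
    pvLoopA ms out =
      if ms.any (fun msg => pvLvl2Flags.any (fun f => PySem.Str.isIn f msg)) then 2
      else if ms.any (fun msg => pvLvl1Flags.any (fun f => PySem.Str.isIn f msg)) then 1
      else out := by
  induction ms generalizing out with
  | nil => simp [pvLoopA]
  | cons msg rest ih =>
    have hne : (out == 2) = false := by rcases h with h | h <;> simp [h]
    have hout : (out != 2) = true := by rcases h with h | h <;> simp [h]
    by_cases hb2 : pvLvl2Flags.any (fun f => PySem.Str.isIn f msg) = true
    · simp only [pvLoopA, List.any_cons, pvScan2A_eq, hb2, hne, eq_self_iff_true, if_true,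
        Bool.false_eq_true, if_false, bne_self_eq_false, Bool.true_or, pvLoopA_two]
    · have hb2' : (pvLvl2Flags.any fun f => PySem.Str.isIn f msg) = false := by
        revert hb2; cases pvLvl2Flags.any fun f => PySem.Str.isIn f msg <;> simp
      by_cases hb1 : pvLvl1Flags.any (fun f => PySem.Str.isIn f msg) = true
      · simp only [pvLoopA, List.any_cons, pvScan2A_eq, pvScan1A_eq, hb2', hb1, hne, hout,
          eq_self_iff_true, if_true, Bool.false_eq_true, if_false, Bool.false_or, Bool.true_or]
        rw [ih 1 (Or.inr rfl)]
        simp only [ite_self]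
      · have hb1' : (pvLvl1Flags.any fun f => PySem.Str.isIn f msg) = false := by
          revert hb1; cases pvLvl1Flags.any fun f => PySem.Str.isIn f msg <;> simp
        simp only [pvLoopA, List.any_cons, pvScan2A_eq, pvScan1A_eq, hb2', hb1', hne, hout,
          Bool.false_eq_true, if_false, Bool.false_or]
        exact ih out h
-- ===== VERDICT (by name: the statement is the Claim_ definition above) =====
theorem check_cyg_quality_spec : Claim_equal_check_cyg_quality := by
  intro qs g _
  unfold Spec_check_cyg_quality check_cyg_quality check_cyg_quality_alt
  by_cases hg : g > 0
  · simp [hg, pvLoopA_eq qs 0 (Or.inl rfl)]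
  · simp [hg, pvLoopA_two]
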